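-- pv_equiv track=rewrite | github.com/eumyang99/TIL | Algorithm/AlgoStudy/프로그래머스/110 옮기기.py | solution
-- ===== SOURCE A (Python) =====
-- def solution(s):
--     answer = []
--     for bin in s:
--         res = ""
--         ## 옮길 수 있는 "110"이 제외된 숫자 배열
--         stack = []
--         ## 옮길 수 있는 "110" 패턴 개수
--         pattern = 0
--         for num in bin:
--             if len(stack) < 2 or num == "1":
--                 stack.append(num)
--             else:
--                 if stack[-1] == "1" and stack[-2] == "1":
--                     stack.pop()
--                     stack.pop()
--                     pattern += 1
--                 else:
--                     stack.append(num)
--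
--         ## 슬라이딩 윈도우 개념 활용
--         ## 마지막 남은 숫자가 1인 경우, 1을 맨 뒤로 보내기 위해서 추가로 1을 2개 더함
--         stack = stack + ["1", "1"]
--         ## stack에 남은 숫자를 앞에서부터 3개씩 확인
--         for i in range(len(stack)-2):
--             three_num = "".join(stack[i:i+3])
--             ## 윈도우에 포함된 숫자가 "111"이면
--             if three_num == "111":
--                 ## 삽입할 수 있는 모든 "110"을 먼저 삽입 후
--                 for _ in range(pattern):
--                     res += "110"
--                 ## stack에 남은 숫자를 모두 더한 뒤 종료
--                 res += "".join(stack[i:-2])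
--                 break
--             ## 윈도우에 포함된 숫자가 "111"이 아닌 경우, "110"삽입할 필요가 없기 때문에
--             else:
--                 ## stack[i]만 추가 후 다음 윈도우로 넘어감
--                 res += stack[i]
--         ## stack을 모두 탐색한 뒤에도 삽입할 "110"이 남아 있다면
--         else:
--             ## 남은 "110"을 모두 덧붙임
--             for _ in range(pattern):
--                 res += "110"
--
--
--         answer.append(res)
--     return answer
-- ===== SOURCE B (Python) =====
-- def solution(s):
--     answer = []
--     for bin in s:
--         # Phase 1: repeatedly delete the first movable "11x" (x != '1') block,
--         # counting deletions; the rule has no self-overlap, so the normal form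
--         # and the deletion count are independent of removal order.
--         t = bin
--         pattern = 0
--         while True:
--             i = -1
--             for j in range(len(t) - 2):
--                 if t[j] == "1" and t[j + 1] == "1" and t[j + 2] != "1":
--                     i = j
--                     break
--             if i == -1:
--                 break
--             t = t[:i] + t[i + 3:]
--             pattern += 1
--         # Phase 2: the removed "110" blocks belong right before the trailing run of '1's.
--         idx = len(t)
--         while idx > 0 and t[idx - 1] == "1":
--             idx -= 1
--         answer.append(t[:idx] + "110" * pattern + t[idx:])
--     return answer
-- ===== Notes on version B (the rewrite author's own statement) =====
-- stated objective: alternative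
-- what changed: Phase 1's one-pass stack reduction is replaced by a fixpoint rewriting loop that repeatedly deletes the first movable '11x' block (correct because the rule has no self-overlap, so the normal form and deletion count are order-independent), and phase 2's padded sliding-window search for '111' with a for/else fallback is replaced by locating the trailing run of '1's and splicing the '110' blocks in front of it.
import Mathlib
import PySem

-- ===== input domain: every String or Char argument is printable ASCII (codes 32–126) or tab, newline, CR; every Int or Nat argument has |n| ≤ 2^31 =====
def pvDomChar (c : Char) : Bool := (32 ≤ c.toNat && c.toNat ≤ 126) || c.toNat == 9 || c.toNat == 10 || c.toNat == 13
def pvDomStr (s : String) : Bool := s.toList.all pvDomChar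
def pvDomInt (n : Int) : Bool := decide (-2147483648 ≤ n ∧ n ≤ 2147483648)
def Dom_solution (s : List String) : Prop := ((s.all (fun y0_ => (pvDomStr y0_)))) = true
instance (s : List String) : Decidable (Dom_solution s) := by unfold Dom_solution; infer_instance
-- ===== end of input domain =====

-- B replaces A's one-pass stack reduction by a fixpoint loop deleting the first movable
-- "11x" block until none remains, and A's padded sliding-window search for "111" by
-- splicing the removed "110" blocks before the trailing run of '1's (objective: alternative).

-- ===== PORT A =====
-- Python's stack (append/pop at the END) is encoded reversed: head = top of stack.
def pvA_phase1 : List Char → List Char → Int → (List Char × Int)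
  | [], st, p => (st, p)
  | c :: cs, st, p =>
    if st.length < 2 ∨ c = '1' then pvA_phase1 cs (c :: st) p
    else
      match st with
      | a :: b :: rest =>
        if a = '1' ∧ b = '1' then pvA_phase1 cs rest (p + 1)
        else pvA_phase1 cs (c :: st) p
      | _ => pvA_phase1 cs (c :: st) p   -- unreachable: st.length ≥ 2 here

-- 'for i in range(len(stack)-2): … break / else: …'; res is a List Char accumulator.
def pvA_phase2 (stack : List Char) (pattern : Int) (i : Nat) (res : List Char) : List Char :=
  if i < stack.length - 2 then
    -- three_num = "".join(stack[i:i+3])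
    if PySem.List.slice stack (some (i : Int)) (some ((i : Int) + (3 : Nat))) = ['1','1','1'] then
      -- for _ in range(pattern): res += "110";  res += "".join(stack[i:-2]);  break
      ((PySem.List.pyRange 0 pattern 1).foldl (fun r _ => r ++ ['1','1','0']) res)
        ++ PySem.List.slice stack (some (i : Int)) (some (-2))
    else
      -- res += stack[i]  (i < len(stack) here, so getD never takes its default)
      pvA_phase2 stack pattern (i + 1) (res ++ [stack.getD i ' '])
  else
    -- for/else branch: for _ in range(pattern): res += "110"
    (PySem.List.pyRange 0 pattern 1).foldl (fun r _ => r ++ ['1','1','0']) res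
termination_by stack.length - 2 - i

def solution (s : List String) : List String :=
  s.foldl (fun answer bin =>
    let sp := pvA_phase1 bin.toList [] 0
    let stack := sp.1.reverse ++ ['1', '1']      -- stack = stack + ["1","1"]
    answer ++ [String.ofList (pvA_phase2 stack sp.2 0 [])]) []

-- ===== PORT B =====
-- inner 'for j in range(len(t)-2): … break' scan: index of the first "11x" (x ≠ '1'), none if absent
def pvB_firstRedex : List Char → Option Nat
  | a :: b :: c :: rest =>
    if a = '1' ∧ b = '1' ∧ c ≠ '1' then some 0
    else (pvB_firstRedex (b :: c :: rest)).map (· + 1)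
  | _ => none

-- (termination helper the port cites)
theorem pvB_firstRedex_le (t : List Char) : ∀ i, pvB_firstRedex t = some i → i + 3 ≤ t.length := by
  induction t with
  | nil => intro i h; simp [pvB_firstRedex] at h
  | cons a l ih =>
    intro i h
    match l, h with
    | [], h => simp [pvB_firstRedex] at h
    | [b], h => simp [pvB_firstRedex] at h
    | b :: c :: r, h =>
      rw [pvB_firstRedex] at h
      split at h
      · simp at h
        simp only [List.length_cons]
        omega
      · simp only [Option.map_eq_some_iff] at h
        obtain ⟨j, hj, hji⟩ := h
        have := ih j hj
        subst hji
        simp only [List.length_cons] at this ⊢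
        omega

-- the 'while True' deletion loop: t = t[:i] + t[i+3:], pattern += 1
def pvB_reduce (t : List Char) (pattern : Int) : List Char × Int :=
  match h : pvB_firstRedex t with
  | none => (t, pattern)
  | some i => pvB_reduce (t.take i ++ t.drop (i + 3)) (pattern + 1)
termination_by t.length
decreasing_by
  have := pvB_firstRedex_le t i h
  simp [List.length_take, List.length_drop]
  omega

-- the 'while idx > 0 and t[idx-1] == "1": idx -= 1' loop
def pvB_trailIdx (t : List Char) : Nat → Nat
  | 0 => 0
  | n + 1 => if t.getD n ' ' = '1' then pvB_trailIdx t n else n + 1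

def solution_alt (s : List String) : List String :=
  s.map (fun bin =>
    let rp := pvB_reduce bin.toList 0
    let t := rp.1
    let idx := pvB_trailIdx t t.length
    let moved := (List.replicate rp.2.toNat ['1','1','0']).flatten   -- "110" * pattern
    String.ofList (t.take idx ++ moved ++ t.drop idx))               -- t[:idx] + moved + t[idx:]

-- ===== PRECONDITION & SPEC =====
def Spec_solution (s : List String) (out : List String) : Prop := out = solution_alt s
instance (s : List String) (out : List String) : Decidable (Spec_solution s out) := by unfold Spec_solution; infer_instance

-- ===== CLAIM (what is proved, stated in full; the proofs are below) =====
def Claim_equal_solution : Prop := ∀ (s : List String), Dom_solution s → Spec_solution s (solution s)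

-- ===== LEMMAS AND PROOFS =====

-- deleting one "11x" (x ≠ '1') block anywhere commutes with A's stack reduction
theorem phase1_splice (x : List Char) {c : Char} (hc : c ≠ '1') (y : List Char) :
    ∀ (st : List Char) (p : Int),
    pvA_phase1 (x ++ '1' :: '1' :: c :: y) st p = pvA_phase1 (x ++ y) st (p + 1) := by
  induction x with
  | nil =>
    intro st p
    match st with
    | [] => simp [pvA_phase1, hc]
    | [a] => simp [pvA_phase1, hc]
    | a :: b :: rest => simp [pvA_phase1, hc]
  | cons d x ih =>
    intro st p
    match st with
    | [] => simp [pvA_phase1, ih]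
    | [a] => simp [pvA_phase1, ih]
    | a :: b :: rest =>
      by_cases hd : d = '1' <;> by_cases ha : a = '1' <;> by_cases hb : b = '1' <;>
        simp [pvA_phase1, hd, ha, hb, ih]

-- firstRedex of a tail
theorem firstRedex_tail {d : Char} {l : List Char}
    (h : pvB_firstRedex (d :: l) = none) : pvB_firstRedex l = none := by
  match l with
  | [] => rfl
  | [a] => rfl
  | a :: b :: r =>
    rw [pvB_firstRedex] at h
    split at h
    · exact absurd h (by simp)
    · simpa using h

-- a visible "11x" block contradicts firstRedex = none
theorem firstRedex_redex (x : List Char) {c : Char} (hc : c ≠ '1') (y : List Char) :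
    pvB_firstRedex (x ++ '1' :: '1' :: c :: y) ≠ none := by
  induction x with
  | nil =>
    intro h
    rw [List.nil_append, pvB_firstRedex, if_pos ⟨rfl, rfl, hc⟩] at h
    exact absurd h (by simp)
  | cons d x ih => exact fun h => ih (firstRedex_tail h)

-- on a normal form A's phase 1 only pushes
theorem phase1_nf : ∀ (t u : List Char) (p : Int),
    pvB_firstRedex (u ++ t) = none → pvA_phase1 t u.reverse p = ((u ++ t).reverse, p) := by
  intro t
  induction t with
  | nil => intro u p _; simp [pvA_phase1]
  | cons c t ih =>
    intro u p hnf
    have hpush : pvA_phase1 (c :: t) u.reverse p = pvA_phase1 t (c :: u.reverse) p := by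
      match hu : u.reverse with
      | [] => simp [pvA_phase1]
      | [a] => simp [pvA_phase1]
      | a :: b :: rest =>
        by_cases hc1 : c = '1'
        · simp [pvA_phase1, hc1]
        · by_cases ha : a = '1' <;> by_cases hb : b = '1'
          · -- would be a pop: u ends with "11" and c ≠ '1' — a redex, contradiction
            exfalso
            have hu' : u = rest.reverse ++ ['1', '1'] := by
              have := congrArg List.reverse hu
              simpa [ha, hb] using this
            refine firstRedex_redex rest.reverse hc1 t ?_
            rw [hu'] at hnf
            simpa using hnf
          · simp [pvA_phase1, hc1, ha, hb]
          · simp [pvA_phase1, hc1, ha, hb]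
          · simp [pvA_phase1, hc1, ha, hb]
    rw [hpush]
    have : c :: u.reverse = (u ++ [c]).reverse := by simp
    rw [this, ih (u ++ [c]) p (by simpa using hnf)]
    simp
-- decompose the list at its first redex
theorem firstRedex_decomp : ∀ (t : List Char) (i : Nat), pvB_firstRedex t = some i →
    ∃ c, c ≠ '1' ∧ t = t.take i ++ '1' :: '1' :: c :: t.drop (i + 3) := by
  intro t
  induction t with
  | nil => intro i h; simp [pvB_firstRedex] at h
  | cons a l ih =>
    intro i h
    match l, h with
    | [], h => simp [pvB_firstRedex] at h
    | [b], h => simp [pvB_firstRedex] at h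
    | b :: c :: r, h =>
      rw [pvB_firstRedex] at h
      split at h
      · rename_i hcond
        obtain ⟨ha, hb, hc⟩ := hcond
        have hi : i = 0 := by simpa using h.symm
        subst hi ha hb
        exact ⟨c, hc, by simp⟩
      · simp only [Option.map_eq_some_iff] at h
        obtain ⟨j, hj, hji⟩ := h
        obtain ⟨d, hd, hdec⟩ := ih j hj
        refine ⟨d, hd, ?_⟩
        subst hji
        simpa using congrArg (a :: ·) hdec

-- A's phase 1 computes B's normal form and count
theorem phase1_eq_reduce : ∀ (t : List Char) (p : Int),
    pvA_phase1 t [] p = ((pvB_reduce t p).1.reverse, (pvB_reduce t p).2) := by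
  intro t p
  induction t, p using pvB_reduce.induct with
  | case1 t p h =>
    rw [pvB_reduce, h]
    exact phase1_nf t [] p (by simpa using h)
  | case2 t p i h ih =>
    rw [pvB_reduce, h]
    obtain ⟨c, hc, hdec⟩ := firstRedex_decomp t i h
    calc pvA_phase1 t [] p
        = pvA_phase1 (t.take i ++ '1' :: '1' :: c :: t.drop (i + 3)) [] p := by rw [← hdec]
      _ = pvA_phase1 (t.take i ++ t.drop (i + 3)) [] (p + 1) := phase1_splice _ hc _ [] p
      _ = _ := ih

-- no redex, elementwise: "11" is always followed by '1'
theorem nf_step {t : List Char} (hnf : pvB_firstRedex t = none) :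
    ∀ j (h2 : j + 2 < t.length), t[j]'(by omega) = '1' → t[j+1]'(by omega) = '1' →
      t[j+2]'h2 = '1' := by
  induction t with
  | nil => intro j h2; simp at h2
  | cons a l ih =>
    intro j h2 hj hj1
    match l, h2 with
    | b :: c :: r, h2 =>
      rw [pvB_firstRedex] at hnf
      have hcond : ¬(a = '1' ∧ b = '1' ∧ c ≠ '1') := by
        intro hh; rw [if_pos hh] at hnf; exact absurd hnf (by simp)
      rw [if_neg hcond] at hnf
      have htail : pvB_firstRedex (b :: c :: r) = none := by simpa using hnf
      match j with
      | 0 =>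
        simp at hj hj1 ⊢
        by_contra hcne
        exact hcond ⟨hj, hj1, hcne⟩
      | j + 1 =>
        have := ih htail j (by simpa using h2) (by simpa using hj) (by simpa using hj1)
        simpa using this

-- once "11" appears (before the end), everything from there on is '1'
theorem nf_ones {t : List Char} (hnf : pvB_firstRedex t = none) :
    ∀ i (hi1 : i + 1 < t.length), t[i]'(Nat.lt_of_succ_lt hi1) = '1' → t[i+1]'hi1 = '1' →
      ∀ j, i ≤ j → (h : j < t.length) → t[j]'h = '1' := by
  intro i hi1 hi hi1v j hij hj
  have key : ∀ k, i ≤ k →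
      ((hk : k < t.length) → t[k]'hk = '1') ∧ ((hk : k + 1 < t.length) → t[k+1]'hk = '1') := by
    intro k hk
    induction k, hk using Nat.le_induction with
    | base => exact ⟨fun _ => hi, fun _ => hi1v⟩
    | succ n hn ihn =>
      refine ⟨fun hk => ihn.2 hk, fun hk => ?_⟩
      exact nf_step hnf n hk (ihn.1 (by omega)) (ihn.2 (by omega))
  exact (key j hij).1 hj

-- pvB_trailIdx basic bounds and properties
theorem trailIdx_le (t : List Char) : ∀ n, pvB_trailIdx t n ≤ n := by
  intro n
  induction n with
  | zero => simp [pvB_trailIdx]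
  | succ n ih =>
    rw [pvB_trailIdx]
    split
    · omega
    · omega

theorem trailIdx_ones (t : List Char) : ∀ n j, pvB_trailIdx t n ≤ j → j < n →
    t.getD j ' ' = '1' := by
  intro n
  induction n with
  | zero => intro j _ hj; omega
  | succ n ih =>
    intro j h1 hj
    by_cases hget : t.getD n ' ' = '1'
    · have e : pvB_trailIdx t (n + 1) = pvB_trailIdx t n := by
        rw [show pvB_trailIdx t (n + 1)
              = if t.getD n ' ' = '1' then pvB_trailIdx t n else n + 1 from rfl, if_pos hget]
      rw [e] at h1
      rcases Nat.lt_or_ge j n with hlt | hge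
      · exact ih j h1 hlt
      · have hjn : j = n := by omega
        rw [hjn]; exact hget
    · have e : pvB_trailIdx t (n + 1) = n + 1 := by
        rw [show pvB_trailIdx t (n + 1)
              = if t.getD n ' ' = '1' then pvB_trailIdx t n else n + 1 from rfl, if_neg hget]
      rw [e] at h1; omega

theorem trailIdx_boundary (t : List Char) : ∀ n, 0 < pvB_trailIdx t n →
    t.getD (pvB_trailIdx t n - 1) ' ' ≠ '1' := by
  intro n
  induction n with
  | zero => intro h; simp [pvB_trailIdx] at h
  | succ n ih =>
    intro hpos
    by_cases hget : t.getD n ' ' = '1'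
    · have e : pvB_trailIdx t (n + 1) = pvB_trailIdx t n := by
        rw [show pvB_trailIdx t (n + 1)
              = if t.getD n ' ' = '1' then pvB_trailIdx t n else n + 1 from rfl, if_pos hget]
      rw [e] at hpos ⊢
      exact ih hpos
    · have e : pvB_trailIdx t (n + 1) = n + 1 := by
        rw [show pvB_trailIdx t (n + 1)
              = if t.getD n ' ' = '1' then pvB_trailIdx t n else n + 1 from rfl, if_neg hget]
      rw [e]
      simpa using hget

-- "110" repeated: A's range-fold equals B's replicate-flatten
theorem moved_fold (p : Int) : ∀ (res : List Char),
    (PySem.List.pyRange 0 p 1).foldl (fun r _ => r ++ ['1','1','0']) res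
      = res ++ (List.replicate p.toNat ['1','1','0']).flatten := by
  have hlen : ∀ (l : List Int) (res : List Char),
      l.foldl (fun r _ => r ++ ['1','1','0']) res
        = res ++ (List.replicate l.length ['1','1','0']).flatten := by
    intro l
    induction l with
    | nil => simp
    | cons x xs ih => intro res; simp [List.foldl_cons, ih, List.replicate_succ]
  intro res
  have := hlen (PySem.List.pyRange 0 p 1) res
  rwa [PySem.List.length_pyRange_one, show p - 0 = p by ring] at this

-- the '[i:i+3]' window slice
theorem window_slice (u : List Char) (i : Nat) :
    PySem.List.slice u (some (i : Int)) (some ((i : Int) + (3 : Nat)))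
      = (u.drop i).take 3 :=
  PySem.List.slice_natCast_add u i 3

-- stack[i:-2] with stack = st ++ ['1','1'] and i ≤ st.length is st.drop i
theorem tail_slice (st : List Char) (i : Nat) (hi : i ≤ st.length) :
    PySem.List.slice (st ++ ['1','1']) (some (i : Int)) (some (-2)) = st.drop i := by
  unfold PySem.List.slice
  simp only [PySem.List.clampIdx_natCast, List.length_append, List.length_cons,
    List.length_nil, PySem.List.clampIdx_neg_ofNat _ 2 (by norm_num)]
  rw [Nat.min_eq_left (by omega)]
  rw [List.drop_append_of_le_length hi]
  exact List.take_left' (by simp)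

-- A's phase-2 scan over the padded normal form = splice at the trailing-ones index
theorem phase2_scan (t : List Char) (hnf : pvB_firstRedex t = none) (p : Int) :
    ∀ (k i : Nat), i + k = pvB_trailIdx t t.length → ∀ (res : List Char),
      pvA_phase2 (t ++ ['1','1']) p i res =
        res ++ (t.drop i).take (pvB_trailIdx t t.length - i)
            ++ (List.replicate p.toNat ['1','1','0']).flatten
            ++ t.drop (pvB_trailIdx t t.length) := by
  have hidx : pvB_trailIdx t t.length ≤ t.length := trailIdx_le t t.length
  have hONES : ∀ j, pvB_trailIdx t t.length ≤ j → (hj : j < t.length) → t[j]'hj = '1' := by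
    intro j h1 hj
    have := trailIdx_ones t t.length j h1 hj
    rwa [List.getD_eq_getElem t ' ' hj] at this
  have hB : 0 < pvB_trailIdx t t.length →
      (hb : pvB_trailIdx t t.length - 1 < t.length) →
      ¬ t[pvB_trailIdx t t.length - 1]'hb = '1' := by
    intro hpos hb
    have := trailIdx_boundary t t.length hpos
    rwa [List.getD_eq_getElem t ' ' hb] at this
  intro k
  induction k with
  | zero =>
    intro i hik res
    have hi : i = pvB_trailIdx t t.length := by omega
    rw [← hi]
    rcases Nat.lt_or_ge i t.length with hlt | hge
    · -- trailing run nonempty: the window at i is "111" (break branch)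
      rw [pvA_phase2, if_pos (by simp; omega)]
      have hwin : PySem.List.slice (t ++ ['1','1']) (some (i : Int)) (some ((i : Int) + (3 : Nat)))
          = ['1','1','1'] := by
        rw [window_slice]
        have hdrop : (t ++ ['1','1']).drop i = t.drop i ++ ['1','1'] :=
          List.drop_append_of_le_length (by omega)
        have hrep : t.drop i = List.replicate (t.length - i) '1' := by
          apply List.ext_getElem (by simp)
          intro j h1 h2
          simp only [List.getElem_drop, List.getElem_replicate]
          exact hONES (i + j) (by omega) (by simp at h1; omega)
        have h2 : (['1','1'] : List Char) = List.replicate 2 '1' := rfl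
        rw [hdrop, hrep, h2, ← List.replicate_add]
        rw [List.take_replicate]
        rw [Nat.min_eq_left (by omega)]
        rfl
      rw [if_pos hwin, moved_fold, tail_slice t i (by omega)]
      simp
    · -- i = trailIdx = len: loop exhausted (for/else branch)
      have hieq : i = t.length := by omega
      rw [pvA_phase2, if_neg (by simp; omega), moved_fold]
      rw [hieq]
      simp
  | succ k ih =>
    intro i hik res
    have hlt : i < pvB_trailIdx t t.length := by omega
    have hilen : i < t.length := by omega
    rw [pvA_phase2, if_pos (by simp; omega)]
    -- the window at i is not "111": its first two characters are not both '1'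
    have hnot11 : ¬ ((t ++ ['1','1'])[i]'(by simp; omega) = '1' ∧
        (t ++ ['1','1'])[i+1]'(by simp; omega) = '1') := by
      have hgi : (t ++ ['1','1'])[i]'(by simp; omega) = t[i]'hilen :=
        List.getElem_append_left hilen
      rintro ⟨h1, h2⟩
      rcases Nat.lt_or_ge (i + 1) t.length with hlt1 | hge1
      · have hgi1 : (t ++ ['1','1'])[i+1]'(by simp; omega) = t[i+1]'hlt1 :=
          List.getElem_append_left hlt1
        rw [hgi] at h1; rw [hgi1] at h2
        -- ones propagate to the end, contradicting the boundary below trailIdx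
        have hall := nf_ones hnf i hlt1 h1 h2
        exact hB (by omega) (by omega)
          (hall (pvB_trailIdx t t.length - 1) (by omega) (by omega))
      · -- i = len - 1 and i < trailIdx ≤ len, so i = trailIdx - 1: boundary is not '1'
        have hieq : i = pvB_trailIdx t t.length - 1 := by omega
        rw [hgi] at h1
        subst hieq
        exact hB (by omega) (by omega) h1
    have hwin : PySem.List.slice (t ++ ['1','1']) (some (i : Int)) (some ((i : Int) + (3 : Nat)))
        ≠ ['1','1','1'] := by
      rw [window_slice]
      intro heq
      have e0 : ((t ++ ['1','1']).drop i).take 3 = [((t ++ ['1','1'])[i]'(by simp; omega)),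
          ((t ++ ['1','1'])[i+1]'(by simp; omega)), ((t ++ ['1','1'])[i+2]'(by simp; omega))] := by
        apply List.ext_getElem (by simp; omega)
        intro j h1 h2
        simp only [List.length_take] at h1
        have hj3 : j < 3 := by omega
        rw [List.getElem_take, List.getElem_drop]
        interval_cases j <;> rfl
      rw [e0] at heq
      simp only [List.cons.injEq] at heq
      exact hnot11 ⟨heq.1, heq.2.1⟩
    rw [if_neg hwin]
    have hgd : (t ++ ['1','1']).getD i ' ' = t[i]'hilen := by
      rw [List.getD_eq_getElem _ _ (by simp; omega)]
      exact List.getElem_append_left hilen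
    rw [hgd, ih (i + 1) (by omega)]
    have hdt : t.drop i = t[i]'hilen :: t.drop (i + 1) := List.drop_eq_getElem_cons hilen
    rw [hdt]
    rw [show pvB_trailIdx t t.length - i = (pvB_trailIdx t t.length - (i + 1)) + 1 by omega]
    rw [List.take_succ_cons]
    simp

-- the loop in pvB_reduce really reaches a normal form
theorem reduce_nf : ∀ (t : List Char) (p : Int), pvB_firstRedex (pvB_reduce t p).1 = none := by
  intro t p
  induction t, p using pvB_reduce.induct with
  | case1 t p h => rw [pvB_reduce, h]; exact h
  | case2 t p i h ih => rw [pvB_reduce, h]; exact ih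

-- ===== VERDICT (by name: the statement is the Claim_ definition above) =====
theorem solution_spec : Claim_equal_solution := by
  intro s hdom
  clear hdom
  unfold Spec_solution solution solution_alt
  induction s using List.reverseRecOn with
  | nil => rfl
  | append_singleton xs x ih =>
    rw [List.foldl_append, List.map_append, List.foldl_cons, List.foldl_nil, ih]
    simp only [List.map_cons, List.map_nil]
    congr 1
    simp only [List.cons.injEq, and_true]
    rw [phase1_eq_reduce]
    simp only [List.reverse_reverse]
    congr 1
    have hnf := reduce_nf x.toList 0
    have h := phase2_scan (pvB_reduce x.toList 0).1 hnf (pvB_reduce x.toList 0).2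
      (pvB_trailIdx (pvB_reduce x.toList 0).1 (pvB_reduce x.toList 0).1.length) 0 (by omega) []
    rw [h]
    simp
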